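-- pv_equiv track=rewrite | github.com/python-edu/accuracy_checker | acc/src/args_data/help_info.py | mk_tables
-- ===== SOURCE A (Python) =====
-- def mk_tables(txt: list[str]) -> list[str]:
--     """Przetwarza wiersze zawierające tabele, czyli zaczynające się od `|`."""
--     res = []
--     txt = txt[:]
--
--     # start: False - wiersz to nie tabela, True - to tabela
--     start = False
--
--     for line in txt:
--         if line.startswith('|'):
--             # początek tabeli
--             if not start:
--                 start = True
--                 res.append("  ```bash")
--
--             line = f"    {line}"
--             res.append(line)
--         else:
--             # breakpoint()
--             if start:
--                 start = False
--                 res.append("  ```")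
--             res.append(line)
--
--     return res
-- ===== SOURCE B (Python) =====
-- def mk_tables(txt: list[str]) -> list[str]:
--     """Przetwarza wiersze zawierające tabele, czyli zaczynające się od `|`."""
--     res = []
--     i = 0
--     n = len(txt)
--     prev_table = False
--     while i < n:
--         flag = txt[i].startswith('|')
--         j = i + 1
--         while j < n and txt[j].startswith('|') == flag:
--             j += 1
--         if flag:
--             res.append("  ```bash")
--             res.extend("    " + line for line in txt[i:j])
--         else:
--             if prev_table:
--                 res.append("  ```")
--             res.extend(txt[i:j])
--         prev_table = flag
--         i = j
--     return res
-- ===== Notes on version B (the rewrite author's own statement) =====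
-- stated objective: alternative
-- what changed: B splits the lines into maximal consecutive runs of table/non-table lines (a hand-rolled groupby) and emits each run as a block, instead of A's line-by-line loop toggling an in-table flag.
import Mathlib
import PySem

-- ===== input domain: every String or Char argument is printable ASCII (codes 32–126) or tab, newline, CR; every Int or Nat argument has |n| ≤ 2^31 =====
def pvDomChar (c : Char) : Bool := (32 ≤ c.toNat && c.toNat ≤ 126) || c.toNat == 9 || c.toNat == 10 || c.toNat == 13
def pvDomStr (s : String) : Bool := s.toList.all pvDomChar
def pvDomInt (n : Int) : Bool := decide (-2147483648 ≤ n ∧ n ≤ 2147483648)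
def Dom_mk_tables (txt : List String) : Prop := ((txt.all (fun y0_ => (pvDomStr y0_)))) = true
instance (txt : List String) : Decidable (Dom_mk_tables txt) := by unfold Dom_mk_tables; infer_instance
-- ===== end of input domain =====

-- B groups the lines into maximal consecutive table/non-table runs and emits each run
-- as one block, instead of A's line-by-line loop toggling an in-table flag (objective: alternative).

-- ===== PORT A =====
-- one step of A's for-loop over the state (res, start)
def mkTablesStepA (st : List String × Bool) (line : String) : List String × Bool :=
  if PySem.Str.startswith line "|" then
    let st := if !st.2 then (st.1 ++ ["  ```bash"], true) else st
    (st.1 ++ ["    " ++ line], st.2)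
  else
    let st := if st.2 then (st.1 ++ ["  ```"], false) else st
    (st.1 ++ [line], st.2)

def mk_tables (txt : List String) : List String :=
  (txt.foldl mkTablesStepA ([], false)).1

-- ===== PORT B =====
-- B's outer while loop: at each head line take the whole maximal run of lines with the
-- same table-flag, emit the corresponding block, and continue after it with prev := flag.
def mkTablesGroupsB (prev : Bool) (txt : List String) : List String :=
  match txt with
  | [] => []
  | l :: rest =>
    let flag := PySem.Str.startswith l "|"
    let run := rest.takeWhile (fun x => PySem.Str.startswith x "|" == flag)
    let rest' := rest.dropWhile (fun x => PySem.Str.startswith x "|" == flag)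
    (if flag then "  ```bash" :: (l :: run).map (fun x => "    " ++ x)
     else (if prev then ["  ```"] else []) ++ (l :: run))
      ++ mkTablesGroupsB flag rest'
termination_by txt.length
decreasing_by
  simp only [List.length_cons]
  exact Nat.lt_succ_of_le (List.length_dropWhile_le _ _)

def mk_tables_alt (txt : List String) : List String :=
  mkTablesGroupsB false txt

-- ===== PRECONDITION & SPEC =====
def Spec_mk_tables (txt : List String) (out : List String) : Prop := out = mk_tables_alt txt
instance (txt : List String) (out : List String) : Decidable (Spec_mk_tables txt out) := by unfold Spec_mk_tables; infer_instance

-- ===== CLAIM (what is proved, stated in full; the proofs are below) =====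
def Claim_equal_mk_tables : Prop := ∀ (txt : List String), Dom_mk_tables txt → Spec_mk_tables txt (mk_tables txt)

-- ===== LEMMAS AND PROOFS =====

-- A's loop written as a structural recursion (accumulator removed)
def mkTablesGoA (s : Bool) (txt : List String) : List String :=
  match txt with
  | [] => []
  | l :: rest =>
    if PySem.Str.startswith l "|" then
      (if !s then ["  ```bash"] else []) ++ ("    " ++ l) :: mkTablesGoA true rest
    else
      (if s then ["  ```"] else []) ++ l :: mkTablesGoA false rest

theorem mkTables_foldl_eq_goA (txt : List String) (acc : List String) (s : Bool) :
    txt.foldl mkTablesStepA (acc, s)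
      = (acc ++ mkTablesGoA s txt, txt.foldl (fun _ l => PySem.Str.startswith l "|") s) := by
  induction txt generalizing acc s with
  | nil => simp [mkTablesGoA]
  | cons l rest ih =>
    simp only [List.foldl_cons, mkTablesStepA, mkTablesGoA]
    by_cases h : PySem.Str.startswith l "|" = true
    · rw [h]
      cases s <;>
        simp only [Bool.not_false, Bool.not_true, if_true, if_false, ih, mkTablesGoA, h,
          List.append_assoc, List.cons_append, List.nil_append, Prod.mk.injEq, and_true] <;>
        simp
    · simp only [Bool.not_eq_true] at h
      rw [h]
      cases s <;>
        simp only [Bool.false_eq_true, if_true, if_false, ih, mkTablesGoA, h,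
          List.append_assoc, List.cons_append, List.nil_append, Prod.mk.injEq, and_true] <;>
        simp

theorem dropWhile_head_not {α : Type} (p : α → Bool) (l : List α) (x : α) (xs : List α)
    (h : l.dropWhile p = x :: xs) : p x = false := by
  induction l with
  | nil => simp at h
  | cons a t ih =>
    by_cases ha : p a = true
    · exact ih (by simpa [ha] using h)
    · simp only [Bool.not_eq_true] at ha
      simp [List.dropWhile_cons, ha] at h
      rw [← h.1]; exact ha

-- flattening a table run (all lines start with '|')
theorem goA_run_true (run rest : List String)
    (h : ∀ x ∈ run, PySem.Str.startswith x "|" = true) :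
    mkTablesGoA true (run ++ rest)
      = run.map (fun x => "    " ++ x) ++ mkTablesGoA true rest := by
  induction run with
  | nil => simp
  | cons x xs ih =>
    have hx : PySem.Str.startswith x "|" = true := h x (List.mem_cons_self)
    have ih' := ih (fun y hy => h y (List.mem_cons_of_mem _ hy))
    simp only [List.cons_append, mkTablesGoA, hx, if_true, Bool.not_true, Bool.false_eq_true,
      if_false, List.nil_append, List.map_cons, ih']

-- flattening a non-table run (no line starts with '|')
theorem goA_run_false (run rest : List String)
    (h : ∀ x ∈ run, PySem.Str.startswith x "|" = false) :
    mkTablesGoA false (run ++ rest) = run ++ mkTablesGoA false rest := by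
  induction run with
  | nil => simp
  | cons x xs ih =>
    have hx : PySem.Str.startswith x "|" = false := h x (List.mem_cons_self)
    have ih' := ih (fun y hy => h y (List.mem_cons_of_mem _ hy))
    simp only [List.cons_append, mkTablesGoA, hx, Bool.false_eq_true, if_false,
      List.nil_append, ih']

theorem goA_eq_groupsB (n : Nat) : ∀ (txt : List String) (prev : Bool), txt.length ≤ n →
    (prev = true → ∀ l rest, txt = l :: rest → PySem.Str.startswith l "|" = false) →
    mkTablesGoA prev txt = mkTablesGroupsB prev txt := by
  induction n with
  | zero =>
    intro txt prev hn _
    have : txt = [] := List.eq_nil_of_length_eq_zero (Nat.le_zero.mp hn)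
    subst this; simp [mkTablesGoA, mkTablesGroupsB]
  | succ n ih =>
    intro txt prev hn hp
    match txt with
    | [] => simp [mkTablesGoA, mkTablesGroupsB]
    | l :: rest =>
      simp only [List.length_cons, Nat.succ_le_succ_iff] at hn
      by_cases hf : PySem.Str.startswith l "|" = true
      · -- table run: prev must be false, since a previous group ends just before a flag change
        have hprev : prev = false := by
          cases prev with
          | false => rfl
          | true => exact absurd ((hp rfl l rest rfl).symm.trans hf) (by decide)
        subst hprev
        rw [mkTablesGroupsB]
        simp only [hf, beq_true, if_true]
        have hmem : ∀ x ∈ rest.takeWhile (fun x => PySem.Str.startswith x "|"),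
            PySem.Str.startswith x "|" = true := fun x hx =>
          List.mem_takeWhile_imp (p := fun x => PySem.Str.startswith x "|") hx
        have hnext : ∀ l' r',
            rest.dropWhile (fun x => PySem.Str.startswith x "|") = l' :: r' →
            PySem.Str.startswith l' "|" = false := by
          intro l' r' hd
          exact dropWhile_head_not _ rest l' r' hd
        have hrec := ih (rest.dropWhile (fun x => PySem.Str.startswith x "|")) true
          (le_trans (List.length_dropWhile_le _ _) hn) (fun _ => hnext)
        rw [mkTablesGoA]
        simp only [hf, if_true, Bool.not_false]
        conv_lhs => rw [← List.takeWhile_append_dropWhile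
          (p := fun x => PySem.Str.startswith x "|") (l := rest)]
        rw [goA_run_true _ _ hmem, hrec]
        simp [mkTablesGoA]
      · simp only [Bool.not_eq_true] at hf
        rw [mkTablesGroupsB]
        simp only [hf, beq_false, Bool.false_eq_true, if_false]
        have hmem : ∀ x ∈ rest.takeWhile (fun x => !PySem.Str.startswith x "|"),
            PySem.Str.startswith x "|" = false := by
          intro x hx
          have := List.mem_takeWhile_imp hx
          simpa using this
        have hrec := ih (rest.dropWhile (fun x => !PySem.Str.startswith x "|")) false
          (le_trans (List.length_dropWhile_le _ _) hn) (by simp)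
        rw [mkTablesGoA]
        simp only [hf, Bool.false_eq_true, if_false]
        conv_lhs => rw [← List.takeWhile_append_dropWhile
          (p := fun x => !PySem.Str.startswith x "|") (l := rest)]
        rw [goA_run_false _ _ hmem, hrec]
        cases prev <;> simp

-- ===== VERDICT (by name: the statement is the Claim_ definition above) =====
theorem mk_tables_spec : Claim_equal_mk_tables := by
  intro txt _
  unfold Spec_mk_tables mk_tables mk_tables_alt
  rw [mkTables_foldl_eq_goA]
  simp only [List.nil_append]
  exact goA_eq_groupsB txt.length txt false (le_refl _) (by simp)
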